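-- pv_equiv track=rewrite | github.com/MOHP8/shopping-website | demo/app/routes/ECPay.py | dotnet_url_decode
-- ===== SOURCE A (Python) =====
-- def dotnet_url_decode(encoded_value):
--     replacements = {
--         '%2d': '-', '%5f': '_', '%2e': '.', '%21': '!',
--         '%2a': '*', '%28': '(', '%29': ')','%20':'+','/':'%2f'
--     }
--
--     # 將編碼根據反向編碼表替換
--     decoded_value = encoded_value
--     for pattern, replacement in replacements.items():
--         decoded_value = decoded_value.replace(pattern, replacement)
--
--     return decoded_value
-- ===== SOURCE B (Python) =====
-- _PAIRS = [('%2d', '-'), ('%5f', '_'), ('%2e', '.'), ('%21', '!'),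
--           ('%2a', '*'), ('%28', '('), ('%29', ')'), ('%20', '+'),
--           ('/', '%2f')]
--
--
-- def dotnet_url_decode(encoded_value):
--     # single left-to-right pass: at each position take the first key that
--     # matches, emit its value and jump over it; otherwise copy the character
--     out = []
--     i = 0
--     n = len(encoded_value)
--     while i < n:
--         for p, r in _PAIRS:
--             if encoded_value.startswith(p, i):
--                 out.append(r)
--                 i += len(p)
--                 break
--         else:
--             out.append(encoded_value[i])
--             i += 1
--     return ''.join(out)
-- ===== Notes on version B (the rewrite author's own statement) =====
-- stated objective: alternative
-- what changed: replaces nine sequential full-string str.replace passes by one left-to-right scan that at each position substitutes the first matching key (or copies the character); equal because no replacement output contains a key and no two keys can match at overlapping positions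
import Mathlib
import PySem

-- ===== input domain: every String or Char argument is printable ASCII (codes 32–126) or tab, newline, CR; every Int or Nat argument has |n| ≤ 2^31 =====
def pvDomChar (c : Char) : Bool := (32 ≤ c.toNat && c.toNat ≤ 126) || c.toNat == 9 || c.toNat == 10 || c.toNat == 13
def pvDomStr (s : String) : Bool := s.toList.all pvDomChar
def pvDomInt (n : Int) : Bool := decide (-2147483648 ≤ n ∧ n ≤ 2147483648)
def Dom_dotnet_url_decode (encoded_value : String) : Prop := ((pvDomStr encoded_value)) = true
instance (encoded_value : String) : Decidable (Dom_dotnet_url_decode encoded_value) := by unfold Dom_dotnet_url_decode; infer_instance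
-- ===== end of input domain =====

-- B replaces A's nine sequential full-string str.replace passes by one left-to-right
-- scan substituting the first matching key at each position; same return value.

-- ===== PORT A =====
-- literal port: the dict literal, then one str.replace per (pattern, replacement) item
def dotnet_url_decode (encoded_value : String) : String :=
  let replacements : PySem.Dict String String := PySem.Dict.ofList
    [("%2d", "-"), ("%5f", "_"), ("%2e", "."), ("%21", "!"),
     ("%2a", "*"), ("%28", "("), ("%29", ")"), ("%20", "+"), ("/", "%2f")]
  replacements.items.foldl
    (fun decoded_value pr => PySem.Str.replace decoded_value pr.1 pr.2) encoded_value

-- ===== PORT B =====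
-- Source B's _PAIRS table, as lists of code points
def pvPairs : List (List Char × List Char) :=
  [("%2d".toList, "-".toList), ("%5f".toList, "_".toList), ("%2e".toList, ".".toList),
   ("%21".toList, "!".toList), ("%2a".toList, "*".toList), ("%28".toList, "(".toList),
   ("%29".toList, ")".toList), ("%20".toList, "+".toList), ("/".toList, "%2f".toList)]

-- Source B's while-loop scan: the inner for-with-break is find? over the pairs; on a match
-- of p the index advances by len(p) (here: drop (p.length - 1) of the tail), else by 1.
def pvScan (pats : List (List Char × List Char)) : List Char → List Char
  | [] => []
  | c :: t =>
    match pats.find? (fun pr => pr.1.isPrefixOf (c :: t)) with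
    | some (p, r) => r ++ pvScan pats (t.drop (p.length - 1))
    | none => c :: pvScan pats t
termination_by l => l.length
decreasing_by
  · simp only [List.length_cons, List.length_drop]; omega
  · simp

def dotnet_url_decode_alt (encoded_value : String) : String :=
  String.ofList (pvScan pvPairs encoded_value.toList)

-- ===== PRECONDITION & SPEC =====
def Spec_dotnet_url_decode (encoded_value : String) (out : String) : Prop := out = dotnet_url_decode_alt encoded_value
instance (encoded_value : String) (out : String) : Decidable (Spec_dotnet_url_decode encoded_value out) := by unfold Spec_dotnet_url_decode; infer_instance

-- ===== CLAIM (what is proved, stated in full; the proofs are below) =====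
def Claim_equal_dotnet_url_decode : Prop := ∀ (encoded_value : String), Dom_dotnet_url_decode encoded_value → Spec_dotnet_url_decode encoded_value (dotnet_url_decode encoded_value)

-- ===== LEMMAS AND PROOFS =====

-- reference form of Python's str.replace (old nonempty): leftmost, non-overlapping
def pvRepl (old new : List Char) : List Char → List Char
  | [] => []
  | c :: t =>
    if old ≠ [] ∧ old.isPrefixOf (c :: t) then
      new ++ pvRepl old new (t.drop (old.length - 1))
    else c :: pvRepl old new t
termination_by l => l.length
decreasing_by
  · simp only [List.length_cons, List.length_drop]; omega
  · simp

lemma pvRepl_nil (old new : List Char) : pvRepl old new [] = [] := by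
  rw [pvRepl]

lemma pvRepl_pos (old new : List Char) (c : Char) (t : List Char) (h : old ≠ [])
    (hp : old.isPrefixOf (c :: t) = true) :
    pvRepl old new (c :: t) = new ++ pvRepl old new ((c :: t).drop old.length) := by
  rw [pvRepl, if_pos ⟨h, hp⟩]
  have h1 : 1 ≤ old.length := by
    cases old with | nil => exact absurd rfl h | cons _ _ => simp
  congr 2
  cases ho : old.length with
  | zero => omega
  | succ k => simp [List.drop_succ_cons]

lemma pvRepl_neg (old new : List Char) (c : Char) (t : List Char)
    (hp : old.isPrefixOf (c :: t) = false) :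
    pvRepl old new (c :: t) = c :: pvRepl old new t := by
  rw [pvRepl, if_neg ?_]
  rintro ⟨_, hx⟩
  rw [hp] at hx
  exact Bool.false_ne_true hx

lemma pv_go_eq (old new : List Char) (h : old ≠ []) :
    ∀ (fuel : Nat) (l acc : List Char), l.length ≤ fuel →
      PySem.Chars.replace.go old new fuel l acc = acc.reverse ++ pvRepl old new l := by
  intro fuel
  induction fuel with
  | zero =>
    intro l acc hl
    have hl0 : l = [] := by cases l <;> simp_all
    subst hl0
    simp [PySem.Chars.replace.go, pvRepl_nil old new]
  | succ n ih =>
    intro l acc hl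
    cases l with
    | nil => simp [PySem.Chars.replace.go, pvRepl_nil old new]
    | cons c t =>
      rw [PySem.Chars.replace.go]
      by_cases hp : old.isPrefixOf (c :: t) = true
      · have hle := (List.isPrefixOf_iff_prefix.mp hp).length_le
        have h1 : 1 ≤ old.length := by
          cases old with | nil => exact absurd rfl h | cons _ _ => simp
        rw [if_pos hp, ih ((c :: t).drop old.length) (new.reverse ++ acc)
            (by simp only [List.length_drop, List.length_cons] at hle hl ⊢; omega)]
        rw [pvRepl_pos old new c t h hp]
        simp
      · rw [if_neg hp, ih t (c :: acc) (by simpa using Nat.le_of_succ_le_succ (by simpa using hl))]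
        rw [pvRepl_neg old new c t (Bool.eq_false_iff.mpr hp)]
        simp

lemma pv_replace_eq (old new l : List Char) (h : old ≠ []) :
    PySem.Chars.replace l old new = pvRepl old new l := by
  have hne : old.isEmpty = false := by cases old with | nil => exact absurd rfl h | cons _ _ => rfl
  rw [PySem.Chars.replace, if_neg (by simp [hne])]
  simpa using pv_go_eq old new h l.length l [] le_rfl

-- pvScan equation lemmas
lemma pvScan_nil (pats : List (List Char × List Char)) : pvScan pats [] = [] := by
  rw [pvScan]

lemma pvScan_cons_some (pats : List (List Char × List Char)) (c : Char) (t p r : List Char)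
    (h : pats.find? (fun pr => pr.1.isPrefixOf (c :: t)) = some (p, r)) :
    pvScan pats (c :: t) = r ++ pvScan pats (t.drop (p.length - 1)) := by
  rw [pvScan, h]

lemma pvScan_cons_none (pats : List (List Char × List Char)) (c : Char) (t : List Char)
    (h : pats.find? (fun pr => pr.1.isPrefixOf (c :: t)) = none) :
    pvScan pats (c :: t) = c :: pvScan pats t := by
  rw [pvScan, h]

lemma pvScan_empty (s : List Char) : pvScan [] s = s := by
  induction s with
  | nil => exact pvScan_nil []
  | cons c t ih => rw [pvScan_cons_none [] c t (by simp), ih]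

-- a prefix of the scan output whose characters differ from every replacement
-- character is a prefix of the input
lemma pvScan_peel (pats : List (List Char × List Char)) :
    ∀ (s w : List Char), (∀ pr ∈ pats, ∃ u₀, pr.2 = [u₀] ∧ u₀ ∉ w) →
      w <+: pvScan pats s → w <+: s := by
  intro s
  induction s with
  | nil =>
    intro w _ hw
    rw [pvScan_nil] at hw
    simpa using hw
  | cons c t ih =>
    intro w hchars hw
    cases w with
    | nil => exact List.nil_prefix
    | cons a w' =>
      cases hfind : pats.find? (fun pr => pr.1.isPrefixOf (c :: t)) with
      | some pr =>
        obtain ⟨p, r⟩ := pr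
        rw [pvScan_cons_some pats c t p r hfind] at hw
        have hmem := List.mem_of_find?_eq_some hfind
        obtain ⟨u₀, hu0, hu0w⟩ := hchars (p, r) hmem
        simp only at hu0
        rw [hu0] at hw
        simp only [List.cons_append, List.nil_append, List.cons_prefix_cons] at hw
        exact absurd (by rw [hw.1]; simp : u₀ ∈ a :: w') hu0w
      | none =>
        rw [pvScan_cons_none pats c t hfind] at hw
        simp only [List.cons_prefix_cons] at hw ⊢
        refine ⟨hw.1, ih w' ?_ hw.2⟩
        intro pr hpr
        obtain ⟨u₀, hu0, hu0w⟩ := hchars pr hpr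
        exact ⟨u₀, hu0, fun hx => hu0w (by simp [hx])⟩

-- characters no pattern starts with pass through the scan unchanged
lemma pvScan_pass (pats : List (List Char × List Char))
    (hq : ∀ pr ∈ pats, pr.1 ≠ []) :
    ∀ (v t : List Char), (∀ pr ∈ pats, ∀ a ∈ v, pr.1.head? ≠ some a) →
      pvScan pats (v ++ t) = v ++ pvScan pats t := by
  intro v
  induction v with
  | nil => intro t _; simp
  | cons a v' ih =>
    intro t hv
    have hnone : pats.find? (fun pr => pr.1.isPrefixOf (a :: (v' ++ t))) = none := by
      rw [List.find?_eq_none]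
      intro pr hpr hx
      replace hx : pr.1.isPrefixOf (a :: (v' ++ t)) = true := hx
      cases hq1 : pr.1 with
      | nil => exact hq pr hpr hq1
      | cons q0 q' =>
        rw [hq1] at hx
        have : q0 = a := by
          have := List.isPrefixOf_iff_prefix.mp hx
          simp only [List.cons_prefix_cons] at this
          exact this.1
        exact hv pr hpr a (by simp) (by rw [hq1, this]; rfl)
    rw [List.cons_append, pvScan_cons_none pats a (v' ++ t) hnone,
        ih t (fun pr hpr x hx => hv pr hpr x (by simp [hx]))]
    rfl

lemma pv_single {l : List Char} (h : l.length = 1) : ∃ a, l = [a] := by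
  cases l with
  | nil => simp at h
  | cons a t =>
    cases t with
    | nil => exact ⟨a, rfl⟩
    | cons b t' => simp at h

-- the key step: one more sequential replace equals adding the pattern to the scan table
theorem pvStep (pats : List (List Char × List Char)) (p r : List Char) (hp : p ≠ [])
    (hqb : pats.all (fun pr => !pr.1.isEmpty) = true)
    (hub : pats.all (fun pr => pr.2.length == 1 && pr.2.all (fun a => !p.contains a)) = true)
    (htb : pats.all (fun pr => p.tail.all (fun a => pr.1.head? != some a)) = true) :
    ∀ s, pvRepl p r (pvScan pats s) = pvScan (pats ++ [(p, r)]) s := by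
  have hq : ∀ pr ∈ pats, pr.1 ≠ [] := by
    intro pr hpr
    have h := List.all_eq_true.mp hqb pr hpr
    simpa using h
  have hu : ∀ pr ∈ pats, pr.2.length = 1 ∧ ∀ a ∈ pr.2, a ∉ p := by
    intro pr hpr
    have h := List.all_eq_true.mp hub pr hpr
    simp only [Bool.and_eq_true, beq_iff_eq, List.all_eq_true, Bool.not_eq_true'] at h
    refine ⟨h.1, fun a ha => ?_⟩
    simpa using h.2 a ha
  have ht : ∀ pr ∈ pats, ∀ a ∈ p.tail, pr.1.head? ≠ some a := by
    intro pr hpr a ha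
    have h := List.all_eq_true.mp htb pr hpr
    simp only [List.all_eq_true, bne_iff_ne, ne_eq] at h
    exact h a ha
  have main : ∀ (n : Nat) (s : List Char), s.length ≤ n →
      pvRepl p r (pvScan pats s) = pvScan (pats ++ [(p, r)]) s := by
    intro n
    induction n with
    | zero =>
      intro s hs
      have : s = [] := by cases s <;> simp_all
      subst this
      rw [pvScan_nil, pvScan_nil, pvRepl_nil p r]
    | succ n ih =>
      intro s hs
      cases s with
      | nil => rw [pvScan_nil, pvScan_nil, pvRepl_nil p r]
      | cons c t =>
        cases h1 : pats.find? (fun pr => pr.1.isPrefixOf (c :: t)) with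
        | some pr =>
          obtain ⟨q, u⟩ := pr
          have hmem := List.mem_of_find?_eq_some h1
          have hqne : q ≠ [] := hq (q, u) hmem
          obtain ⟨hlen1, hnot⟩ := hu (q, u) hmem
          obtain ⟨u₀, hu0⟩ := pv_single hlen1
          have hu0p : u₀ ∉ p := hnot u₀ (by rw [hu0]; simp)
          replace hu0 : u = [u₀] := hu0
          have hfind' : (pats ++ [(p, r)]).find? (fun pr => pr.1.isPrefixOf (c :: t)) = some (q, u) := by
            rw [List.find?_append, h1]; rfl
          rw [pvScan_cons_some pats c t q u h1, pvScan_cons_some _ c t q u hfind', hu0]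
          have hpneg : p.isPrefixOf (u₀ :: pvScan pats (t.drop (q.length - 1))) = false := by
            cases hp1 : p with
            | nil => exact absurd hp1 hp
            | cons p0 p' =>
              have : p0 ≠ u₀ := by
                intro hcontra
                exact hu0p (by rw [hp1, hcontra]; simp)
              simp [List.isPrefixOf, this]
          rw [List.singleton_append, pvRepl_neg p r u₀ _ hpneg]
          have hlen : (t.drop (q.length - 1)).length ≤ n := by
            simp only [List.length_drop]
            simp only [List.length_cons] at hs
            omega
          rw [ih (t.drop (q.length - 1)) hlen]
          rfl
        | none =>
          by_cases hpm : p.isPrefixOf (c :: t) = true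
          · -- p matches here
            have hfind' : (pats ++ [(p, r)]).find? (fun pr => pr.1.isPrefixOf (c :: t)) = some (p, r) := by
              rw [List.find?_append, h1, Option.none_or, List.find?_cons_of_pos (by exact hpm)]
            obtain ⟨p0, p'⟩ : ∃ p0 p', p = p0 :: p' := by
              cases p with | nil => exact absurd rfl hp | cons a b => exact ⟨a, b, rfl⟩
            obtain ⟨p', hp1⟩ := p'
            have hpre := List.isPrefixOf_iff_prefix.mp hpm
            rw [hp1] at hpre
            have hc : p0 = c := by
              simpa using (List.cons_prefix_cons.mp hpre).1
            obtain ⟨t', ht'⟩ := (List.cons_prefix_cons.mp hpre).2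
            replace ht' : t = p' ++ t' := ht'.symm
            have hscan : pvScan pats (c :: t) = c :: (p' ++ pvScan pats t') := by
              rw [pvScan_cons_none pats c t h1, ht',
                  pvScan_pass pats hq p' t'
                    (fun pr hpr a ha => ht pr hpr a (by rw [hp1]; simpa using ha))]
            rw [hscan]
            have hpref2 : p.isPrefixOf (c :: (p' ++ pvScan pats t')) = true := by
              rw [hp1, hc]
              exact List.isPrefixOf_iff_prefix.mpr (by simp [List.prefix_append])
            rw [pvRepl_pos p r c (p' ++ pvScan pats t') hp hpref2]
            have hdrop : (c :: (p' ++ pvScan pats t')).drop p.length = pvScan pats t' := by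
              rw [hp1]
              simp
            rw [hdrop]
            have hlen : t'.length ≤ n := by
              have : t.length ≤ n := by simpa using Nat.le_of_succ_le_succ hs
              rw [ht'] at this
              simp only [List.length_append] at this
              omega
            rw [ih t' hlen, pvScan_cons_some _ c t p r hfind']
            congr 1
            rw [hp1, ht']
            simp
          · -- nothing matches here
            have hfind' : (pats ++ [(p, r)]).find? (fun pr => pr.1.isPrefixOf (c :: t)) = none := by
              rw [List.find?_append, h1, Option.none_or, List.find?_cons_of_neg (by simpa using hpm),
                  List.find?_nil]
            rw [pvScan_cons_none pats c t h1, pvScan_cons_none _ c t hfind']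
            have hpneg : p.isPrefixOf (c :: pvScan pats t) = false := by
              by_contra hcontra
              have hyes : p.isPrefixOf (c :: pvScan pats t) = true := by
                cases hb : p.isPrefixOf (c :: pvScan pats t) with
                | false => exact absurd hb hcontra
                | true => rfl
              obtain ⟨p0, p'⟩ : ∃ p0 p', p = p0 :: p' := by
                cases p with | nil => exact absurd rfl hp | cons a b => exact ⟨a, b, rfl⟩
              obtain ⟨p', hp1⟩ := p'
              have hpre := List.isPrefixOf_iff_prefix.mp hyes
              rw [hp1] at hpre
              have hc : p0 = c := (List.cons_prefix_cons.mp hpre).1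
              have hp'pre : p' <+: pvScan pats t := (List.cons_prefix_cons.mp hpre).2
              have hp't : p' <+: t := by
                refine pvScan_peel pats t p' ?_ hp'pre
                intro pr hpr
                obtain ⟨hlen1, hnot⟩ := hu pr hpr
                obtain ⟨u₀, hu0⟩ := pv_single hlen1
                refine ⟨u₀, hu0, fun hx => ?_⟩
                exact hnot u₀ (by rw [hu0]; simp) (by rw [hp1]; simp [hx])
              have : p.isPrefixOf (c :: t) = true := by
                rw [hp1, hc]
                exact List.isPrefixOf_iff_prefix.mpr (List.cons_prefix_cons.mpr ⟨rfl, hp't⟩)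
              exact hpm this
            rw [pvRepl_neg p r c _ hpneg,
                ih t (by simpa using Nat.le_of_succ_le_succ hs)]
  intro s
  exact main s.length s le_rfl

-- the nine growing scan tables
def pvL1 : List (List Char × List Char) := pvPairs.take 1
def pvL2 : List (List Char × List Char) := pvPairs.take 2
def pvL3 : List (List Char × List Char) := pvPairs.take 3
def pvL4 : List (List Char × List Char) := pvPairs.take 4
def pvL5 : List (List Char × List Char) := pvPairs.take 5
def pvL6 : List (List Char × List Char) := pvPairs.take 6
def pvL7 : List (List Char × List Char) := pvPairs.take 7
def pvL8 : List (List Char × List Char) := pvPairs.take 8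

set_option maxRecDepth 8192 in
lemma pv_chain (s : List Char) :
    pvRepl "/".toList "%2f".toList
      (pvRepl "%20".toList "+".toList
        (pvRepl "%29".toList ")".toList
          (pvRepl "%28".toList "(".toList
            (pvRepl "%2a".toList "*".toList
              (pvRepl "%21".toList "!".toList
                (pvRepl "%2e".toList ".".toList
                  (pvRepl "%5f".toList "_".toList
                    (pvRepl "%2d".toList "-".toList s)))))))) = pvScan pvPairs s := by
  have e0 : pvRepl "%2d".toList "-".toList s = pvScan pvL1 s := by
    have h := pvStep [] "%2d".toList "-".toList (by decide) (by decide) (by decide) (by decide) s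
    rw [pvScan_empty] at h
    exact h
  have e1 : pvRepl "%5f".toList "_".toList (pvScan pvL1 s) = pvScan pvL2 s :=
    pvStep pvL1 _ _ (by decide) (by decide) (by decide) (by decide) s
  have e2 : pvRepl "%2e".toList ".".toList (pvScan pvL2 s) = pvScan pvL3 s :=
    pvStep pvL2 _ _ (by decide) (by decide) (by decide) (by decide) s
  have e3 : pvRepl "%21".toList "!".toList (pvScan pvL3 s) = pvScan pvL4 s :=
    pvStep pvL3 _ _ (by decide) (by decide) (by decide) (by decide) s
  have e4 : pvRepl "%2a".toList "*".toList (pvScan pvL4 s) = pvScan pvL5 s :=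
    pvStep pvL4 _ _ (by decide) (by decide) (by decide) (by decide) s
  have e5 : pvRepl "%28".toList "(".toList (pvScan pvL5 s) = pvScan pvL6 s :=
    pvStep pvL5 _ _ (by decide) (by decide) (by decide) (by decide) s
  have e6 : pvRepl "%29".toList ")".toList (pvScan pvL6 s) = pvScan pvL7 s :=
    pvStep pvL6 _ _ (by decide) (by decide) (by decide) (by decide) s
  have e7 : pvRepl "%20".toList "+".toList (pvScan pvL7 s) = pvScan pvL8 s :=
    pvStep pvL7 _ _ (by decide) (by decide) (by decide) (by decide) s
  have e8 : pvRepl "/".toList "%2f".toList (pvScan pvL8 s) = pvScan pvPairs s :=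
    pvStep pvL8 _ _ (by decide) (by decide) (by decide) (by decide) s
  rw [e0, e1, e2, e3, e4, e5, e6, e7, e8]

lemma pv_A_unfold (s : String) :
    dotnet_url_decode s =
      PySem.Str.replace (PySem.Str.replace (PySem.Str.replace (PySem.Str.replace
        (PySem.Str.replace (PySem.Str.replace (PySem.Str.replace (PySem.Str.replace
          (PySem.Str.replace s "%2d" "-") "%5f" "_") "%2e" ".") "%21" "!")
          "%2a" "*") "%28" "(") "%29" ")") "%20" "+") "/" "%2f" := rfl

-- ===== VERDICT (by name: the statement is the Claim_ definition above) =====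
set_option maxRecDepth 8192 in
theorem dotnet_url_decode_spec : Claim_equal_dotnet_url_decode := by
  intro s _
  unfold Spec_dotnet_url_decode
  apply String.toList_inj.mp
  rw [pv_A_unfold]
  simp only [PySem.Str.toList_replace]
  rw [pv_replace_eq _ _ _ (by decide), pv_replace_eq _ _ _ (by decide),
      pv_replace_eq _ _ _ (by decide), pv_replace_eq _ _ _ (by decide),
      pv_replace_eq _ _ _ (by decide), pv_replace_eq _ _ _ (by decide),
      pv_replace_eq _ _ _ (by decide), pv_replace_eq _ _ _ (by decide),
      pv_replace_eq _ _ _ (by decide)]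
  rw [pv_chain]
  simp [dotnet_url_decode_alt]
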